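-- pv_equiv track=rewrite | github.com/manukumarcode23/57 | bot/modules/device_detection.py | is_likely_emulator
-- ===== SOURCE A (Python) =====
-- def is_likely_emulator(user_agent: str, device_name: str) -> bool:
--     """Check if device is likely an emulator"""
--     user_agent_lower = user_agent.lower()
--     device_name_lower = device_name.lower()
--
--     emulator_indicators = [
--         'generic', 'sdk_gphone', 'emulator', 'virtualbox',
--         'vmware', 'genymotion', 'bluestacks', 'noxplayer',
--         'memu', 'ldplayer', 'vbox'
--     ]
--
--     for indicator in emulator_indicators:
--         if indicator in user_agent_lower or indicator in device_name_lower: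
--             return True
--
--     return False
-- ===== SOURCE B (Python) =====
-- def is_likely_emulator(user_agent: str, device_name: str) -> bool:
--     """Check if device is likely an emulator"""
--     indicators = (
--         'generic', 'sdk_gphone', 'emulator', 'virtualbox',
--         'vmware', 'genymotion', 'bluestacks', 'noxplayer',
--         'memu', 'ldplayer', 'vbox'
--     )
--
--     def scan(text):
--         t = text.lower()
--         for j in range(len(t) + 1):
--             for ind in indicators:
--                 if t.startswith(ind, j):
--                     return True
--         return False
--
--     return scan(user_agent) or scan(device_name)
-- ===== Notes on version B (the rewrite author's own statement) =====
-- stated objective: alternative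
-- what changed: A iterates over the indicator list and runs a separate substring search over both strings for each indicator; B makes a single left-to-right scan over each string's positions, checking at each position whether any indicator starts there.
import Mathlib
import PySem

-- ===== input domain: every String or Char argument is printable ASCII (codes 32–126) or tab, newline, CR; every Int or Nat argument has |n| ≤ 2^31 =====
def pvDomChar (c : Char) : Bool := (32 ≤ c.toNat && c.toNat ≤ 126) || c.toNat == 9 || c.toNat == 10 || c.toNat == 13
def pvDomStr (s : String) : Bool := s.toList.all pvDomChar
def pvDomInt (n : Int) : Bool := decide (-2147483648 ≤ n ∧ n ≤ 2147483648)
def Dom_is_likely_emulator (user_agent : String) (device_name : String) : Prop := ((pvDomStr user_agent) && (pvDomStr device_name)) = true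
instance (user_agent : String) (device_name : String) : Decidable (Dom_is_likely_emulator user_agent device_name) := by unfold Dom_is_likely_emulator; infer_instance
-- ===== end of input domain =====

-- B replaces A's per-indicator substring searches by one position-wise scan of each
-- string, checking at each position whether any indicator is a prefix (alternative
-- decomposition, same cost).


-- ===== PORT A =====
def emulatorIndicators : List String :=
  ["generic", "sdk_gphone", "emulator", "virtualbox",
   "vmware", "genymotion", "bluestacks", "noxplayer",
   "memu", "ldplayer", "vbox"]

-- the 'for indicator in …: if …: return True' loop, early return as recursion
def emuLoop (inds : List String) (ual dnl : String) : Bool :=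
  match inds with
  | [] => false
  | i :: rest =>
    if PySem.Str.isIn i ual || PySem.Str.isIn i dnl then true
    else emuLoop rest ual dnl

def is_likely_emulator (user_agent : String) (device_name : String) : Bool :=
  let user_agent_lower := PySem.Str.lower user_agent
  let device_name_lower := PySem.Str.lower device_name
  emuLoop emulatorIndicators user_agent_lower device_name_lower

-- ===== PORT B =====
def emulatorIndicatorsAlt : List (List Char) :=
  emulatorIndicators.map String.toList

-- B's scan: walk the text position by position; at each position test whether
-- some indicator starts there ('t.startswith(ind, j)')
def emuScan (s : List Char) : Bool :=
  match s with
  | [] => emulatorIndicatorsAlt.any (fun i => i.isPrefixOf [])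
  | _ :: t => emulatorIndicatorsAlt.any (fun i => i.isPrefixOf s) || emuScan t

def is_likely_emulator_alt (user_agent : String) (device_name : String) : Bool :=
  emuScan (PySem.Chars.lower user_agent.toList) || emuScan (PySem.Chars.lower device_name.toList)

-- ===== PRECONDITION & SPEC =====
def Spec_is_likely_emulator (user_agent : String) (device_name : String) (out : Bool) : Prop := out = is_likely_emulator_alt user_agent device_name
instance (user_agent : String) (device_name : String) (out : Bool) : Decidable (Spec_is_likely_emulator user_agent device_name out) := by unfold Spec_is_likely_emulator; infer_instance

-- ===== CLAIM (what is proved, stated in full; the proofs are below) =====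
def Claim_equal_is_likely_emulator : Prop := ∀ (user_agent : String) (device_name : String), Dom_is_likely_emulator user_agent device_name → Spec_is_likely_emulator user_agent device_name (is_likely_emulator user_agent device_name)

-- ===== LEMMAS AND PROOFS =====

-- B's scan finds exactly the indicators occurring as a prefix of some suffix
theorem emuScan_iff (s : List Char) :
    emuScan s = true ↔ ∃ i ∈ emulatorIndicatorsAlt, ∃ j, i <+: s.drop j := by
  induction s with
  | nil =>
    simp [emuScan, List.any_eq_true, List.IsPrefix]
  | cons c t ih =>
    simp only [emuScan, Bool.or_eq_true, List.any_eq_true, ih]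
    constructor
    · rintro (⟨i, hi, hp⟩ | ⟨i, hi, j, hp⟩)
      · exact ⟨i, hi, 0, by simpa using hp⟩
      · exact ⟨i, hi, j + 1, by simpa using hp⟩
    · rintro ⟨i, hi, j, hp⟩
      cases j with
      | zero => exact Or.inl ⟨i, hi, by simpa using hp⟩
      | succ j => exact Or.inr ⟨i, hi, j, by simpa using hp⟩

theorem emuScan_eq_isIn (s : List Char) :
    emuScan s = true ↔ ∃ i ∈ emulatorIndicatorsAlt, PySem.Chars.isIn i s = true := by
  rw [emuScan_iff]
  constructor
  · rintro ⟨i, hi, j, hp⟩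
    exact ⟨i, hi, (PySem.Chars.exists_prefix_drop_iff_isIn i s).1 ⟨j, hp⟩⟩
  · rintro ⟨i, hi, h⟩
    obtain ⟨j, hp⟩ := (PySem.Chars.exists_prefix_drop_iff_isIn i s).2 h
    exact ⟨i, hi, j, hp⟩

-- A's loop is the disjunction over the indicator list
theorem emuLoop_iff (inds : List String) (ual dnl : String) :
    emuLoop inds ual dnl = true ↔
      ∃ i ∈ inds, (PySem.Str.isIn i ual = true ∨ PySem.Str.isIn i dnl = true) := by
  induction inds with
  | nil => simp [emuLoop]
  | cons i rest ih =>
    simp only [emuLoop]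
    split_ifs with h
    · simp only [true_iff]
      rcases Bool.or_eq_true_iff.1 h with h' | h'
      · exact ⟨i, by simp, Or.inl h'⟩
      · exact ⟨i, by simp, Or.inr h'⟩
    · rw [ih]
      constructor
      · rintro ⟨k, hk, hh⟩; exact ⟨k, List.mem_cons_of_mem _ hk, hh⟩
      · rintro ⟨k, hk, hh⟩
        rcases List.mem_cons.1 hk with rfl | hk'
        · exact absurd (Bool.or_eq_true_iff.2 hh) (by simpa using h)
        · exact ⟨k, hk', hh⟩

theorem str_isIn_lower (i s : String) :
    PySem.Str.isIn i (PySem.Str.lower s) = PySem.Chars.isIn i.toList (PySem.Chars.lower s.toList) := by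
  simp [PySem.Str.isIn, PySem.Str.lower]

-- ===== VERDICT (by name: the statement is the Claim_ definition above) =====
theorem is_likely_emulator_spec : Claim_equal_is_likely_emulator := by
  intro ua dn _
  unfold Spec_is_likely_emulator
  unfold is_likely_emulator is_likely_emulator_alt
  simp only
  rw [Bool.eq_iff_iff]
  rw [emuLoop_iff, Bool.or_eq_true, emuScan_eq_isIn, emuScan_eq_isIn]
  simp only [str_isIn_lower, emulatorIndicatorsAlt, List.mem_map]
  constructor
  · rintro ⟨i, hi, h | h⟩
    · exact Or.inl ⟨_, ⟨i, hi, rfl⟩, h⟩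
    · exact Or.inr ⟨_, ⟨i, hi, rfl⟩, h⟩
  · rintro (⟨_, ⟨i, hi, rfl⟩, h⟩ | ⟨_, ⟨i, hi, rfl⟩, h⟩)
    · exact ⟨i, hi, Or.inl h⟩
    · exact ⟨i, hi, Or.inr h⟩
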